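-- pv_equiv track=rewrite | github.com/zhukovgreen/interviews | codility_real.py | solution
-- ===== SOURCE A (Python) =====
-- from itertools import product
--
-- def solution(U: int, L: int, C: list) -> str:
--     # write your code in Python 3.6
--     first_row_candidates = []
--     second_row_candidates = []
--     for ci in C:
--         if ci == 2:
--             first_row_candidates.append((1,))
--             second_row_candidates.append((1,))
--         elif ci == 0:
--             first_row_candidates.append((0,))
--             second_row_candidates.append((0,))
--         else:
--             first_row_candidates.append((0, 1))
--             second_row_candidates.append((1, 0))
--     first_row_candidates = list(product(*first_row_candidates))
--     second_row_candidates = list(product(*second_row_candidates))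
--     for idx, candidate in enumerate(first_row_candidates):
--         if sum(candidate) == U and sum(second_row_candidates[idx]) == L:
--             return (
--                 "".join(map(str, candidate))
--                 + ","
--                 + "".join(map(str, second_row_candidates[idx]))
--             )
--     return "IMPOSSIBLE"
-- ===== SOURCE B (Python) =====
-- def solution(U: int, L: int, C: list) -> str:
--     # O(n): count fixed columns, then place the ones of the first row in the
--     # last free columns (the lexicographically first assignment product() yields).
--     f = 0  # columns forced to (1,1)
--     k = 0  # free columns
--     for ci in C:
--         if ci == 2:
--             f += 1
--         elif ci != 0:
--             k += 1
--     t = U - f  # ones needed among free columns of the first row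
--     if t < 0 or t > k or L != f + k - t:
--         return "IMPOSSIBLE"
--     z = k - t  # leading free columns that get 0 in the first row
--     row1 = []
--     row2 = []
--     for ci in C:
--         if ci == 2:
--             row1.append("1"); row2.append("1")
--         elif ci == 0:
--             row1.append("0"); row2.append("0")
--         elif z > 0:
--             row1.append("0"); row2.append("1"); z -= 1
--         else:
--             row1.append("1"); row2.append("0")
--     return "".join(row1) + "," + "".join(row2)
-- ===== Notes on version B (the rewrite author's own statement) =====
-- stated objective: faster
-- what changed: A enumerates all 2^k candidate row pairs with itertools.product and scans for the first match; B counts the forced and free columns, checks feasibility arithmetically, and directly builds the lexicographically first assignment (zeros in the leading free columns) in one pass.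
import Mathlib
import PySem

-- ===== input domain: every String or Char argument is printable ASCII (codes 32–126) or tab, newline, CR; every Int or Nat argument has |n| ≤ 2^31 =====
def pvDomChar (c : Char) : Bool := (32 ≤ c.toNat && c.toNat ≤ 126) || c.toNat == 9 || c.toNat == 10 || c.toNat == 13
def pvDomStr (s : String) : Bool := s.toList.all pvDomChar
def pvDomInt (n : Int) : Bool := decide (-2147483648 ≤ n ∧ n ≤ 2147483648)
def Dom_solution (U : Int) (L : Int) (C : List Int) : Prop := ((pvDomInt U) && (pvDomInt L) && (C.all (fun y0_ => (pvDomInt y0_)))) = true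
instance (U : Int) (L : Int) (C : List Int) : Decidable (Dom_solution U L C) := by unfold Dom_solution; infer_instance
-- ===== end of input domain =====

-- B replaces A's exhaustive itertools.product search (O(2^k·n)) by an O(n) counting
-- construction that places the first row's ones in the last free columns — the
-- lexicographically first candidate the product enumeration would find.

-- ===== PORT A =====
-- itertools.product(*lists), in Python's enumeration order (last position varies fastest)
def pyProduct : List (List Int) → List (List Int)
  | [] => [[]]
  | xs :: rest => xs.flatMap (fun x => (pyProduct rest).map (fun t => x :: t))

-- "".join(map(str, cand))
def renderRow (c : List Int) : String := PySem.Str.join "" (c.map PySem.Int.toStr)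

-- the 'for idx, candidate in enumerate(first_row_candidates)' loop; the index into
-- second_row_candidates is always in range (both products have equal length)
def searchLoop (U L : Int) (second : List (List Int)) : Nat → List (List Int) → String
  | _, [] => "IMPOSSIBLE"
  | idx, cand :: rest =>
    if cand.sum = U ∧ (PySem.List.pyGetD second (idx : Int) []).sum = L then
      renderRow cand ++ "," ++ renderRow (PySem.List.pyGetD second (idx : Int) [])
    else searchLoop U L second (idx + 1) rest

def solution (U : Int) (L : Int) (C : List Int) : String :=
  let firstCands := pyProduct (C.map (fun ci =>
    if ci = 2 then [(1 : Int)] else if ci = 0 then [0] else [0, 1]))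
  let secondCands := pyProduct (C.map (fun ci =>
    if ci = 2 then [(1 : Int)] else if ci = 0 then [0] else [1, 0]))
  searchLoop U L secondCands 0 firstCands

-- ===== PORT B =====
-- build both rows in one pass: z = number of leading free columns that get 0 in row 1
def buildRows : List Int → Int → List String × List String
  | [], _ => ([], [])
  | ci :: rest, z =>
    if ci = 2 then
      let p := buildRows rest z; ("1" :: p.1, "1" :: p.2)
    else if ci = 0 then
      let p := buildRows rest z; ("0" :: p.1, "0" :: p.2)
    else if z > 0 then
      let p := buildRows rest (z - 1); ("0" :: p.1, "1" :: p.2)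
    else
      let p := buildRows rest z; ("1" :: p.1, "0" :: p.2)

def solution_alt (U : Int) (L : Int) (C : List Int) : String :=
  let fk := C.foldl (fun (p : Int × Int) ci =>
    if ci = 2 then (p.1 + 1, p.2) else if ci ≠ 0 then (p.1, p.2 + 1) else p) (0, 0)
  let f := fk.1
  let k := fk.2
  let t := U - f
  if t < 0 ∨ t > k ∨ L ≠ f + k - t then "IMPOSSIBLE"
  else
    let p := buildRows C (k - t)
    PySem.Str.join "" p.1 ++ "," ++ PySem.Str.join "" p.2

-- ===== PRECONDITION & SPEC =====
def Spec_solution (U : Int) (L : Int) (C : List Int) (out : String) : Prop := out = solution_alt U L C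
instance (U : Int) (L : Int) (C : List Int) (out : String) : Decidable (Spec_solution U L C out) := by unfold Spec_solution; infer_instance

-- ===== CLAIM (what is proved, stated in full; the proofs are below) =====
def Claim_equal_solution : Prop := ∀ (U : Int) (L : Int) (C : List Int), Dom_solution U L C → Spec_solution U L C (solution U L C)

-- ===== LEMMAS AND PROOFS =====

-- the two product lists, zipped positionally (the pairing A's index lookup realises)
def zipCands : List Int → List (List Int × List Int)
  | [] => [([], [])]
  | ci :: rest =>
    if ci = 2 then (zipCands rest).map (fun p => (1 :: p.1, 1 :: p.2))
    else if ci = 0 then (zipCands rest).map (fun p => (0 :: p.1, 0 :: p.2))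
    else (zipCands rest).map (fun p => (0 :: p.1, 1 :: p.2))
      ++ (zipCands rest).map (fun p => (1 :: p.1, 0 :: p.2))

def findPair (U L : Int) : List (List Int × List Int) → Option (List Int × List Int)
  | [] => none
  | p :: rest => if p.1.sum = U ∧ p.2.sum = L then some p else findPair U L rest

def cf : List Int → Int
  | [] => 0
  | ci :: r => (if ci = 2 then 1 else 0) + cf r

def ck : List Int → Int
  | [] => 0
  | ci :: r => (if ci ≠ 2 ∧ ci ≠ 0 then 1 else 0) + ck r

lemma ck_nonneg (C : List Int) : 0 ≤ ck C := by
  induction C with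
  | nil => simp [ck]
  | cons ci r ih => simp only [ck]; split <;> omega

lemma toStr_zero : PySem.Int.toStr 0 = "0" := by decide
lemma toStr_one : PySem.Int.toStr 1 = "1" := by decide

lemma pyProduct_fst (C : List Int) :
    pyProduct (C.map (fun ci => if ci = 2 then [(1 : Int)] else if ci = 0 then [0] else [0, 1]))
      = (zipCands C).map (·.1) := by
  induction C with
  | nil => rfl
  | cons ci rest ih =>
    simp only [List.map_cons, pyProduct, ih, zipCands]
    split_ifs <;> simp [List.flatMap_cons, List.map_map, Function.comp_def]

lemma pyProduct_snd (C : List Int) :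
    pyProduct (C.map (fun ci => if ci = 2 then [(1 : Int)] else if ci = 0 then [0] else [1, 0]))
      = (zipCands C).map (·.2) := by
  induction C with
  | nil => rfl
  | cons ci rest ih =>
    simp only [List.map_cons, pyProduct, ih, zipCands]
    split_ifs <;> simp [List.flatMap_cons, List.map_map, Function.comp_def]

-- the indexed loop over the zipped candidates is findPair
lemma searchLoop_eq_findPair (U L : Int) (full : List (List Int × List Int)) :
    ∀ (zs : List (List Int × List Int)) (i : Nat), full.drop i = zs →
    searchLoop U L (full.map (·.2)) i (zs.map (·.1)) =
      (match findPair U L zs with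
       | some p => renderRow p.1 ++ "," ++ renderRow p.2
       | none => "IMPOSSIBLE") := by
  intro zs
  induction zs with
  | nil => intro i _; rfl
  | cons p rest ih =>
    intro i hdrop
    have hi : full[i]? = some p := by
      have h0 : (full.drop i)[0]? = some p := by rw [hdrop]; rfl
      rw [List.getElem?_drop] at h0; simpa using h0
    have hget : PySem.List.pyGetD (full.map (·.2)) (i : Int) [] = p.2 := by
      rw [PySem.List.pyGetD_natCast]
      have : (full.map (·.2))[i]? = some p.2 := by
        simp [List.getElem?_map, hi]
      simp [List.getD, this]
    have hnext : full.drop (i + 1) = rest := by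
      have h1 : full.drop (i + 1) = (full.drop i).drop 1 := by rw [List.drop_drop]
      simp [h1, hdrop]
    simp only [List.map_cons, searchLoop, hget, findPair]
    split_ifs with h
    · rfl
    · exact ih (i + 1) hnext

lemma findPair_map_cons (U L x y : Int) (Z : List (List Int × List Int)) :
    findPair U L (Z.map (fun p => (x :: p.1, y :: p.2)))
      = (findPair (U - x) (L - y) Z).map (fun p => (x :: p.1, y :: p.2)) := by
  induction Z with
  | nil => rfl
  | cons p rest ih =>
    simp only [List.map_cons, findPair, List.sum_cons, ih]
    by_cases h1 : p.1.sum = U - x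
    · by_cases h2 : p.2.sum = L - y
      · rw [if_pos (by omega), if_pos ⟨h1, h2⟩]; rfl
      · rw [if_neg (by omega), if_neg (by simp [h1, h2])]
    · rw [if_neg (by omega), if_neg (by simp [h1])]

lemma findPair_append (U L : Int) (l1 l2 : List (List Int × List Int)) :
    findPair U L (l1 ++ l2) = (findPair U L l1).or (findPair U L l2) := by
  induction l1 with
  | nil => simp [findPair]
  | cons p rest ih =>
    simp only [List.cons_append, findPair]
    split_ifs <;> simp [ih]

lemma map_toStr_cons (x y : Int) (o : Option (List Int × List Int)) :
    (o.map (fun p => (x :: p.1, y :: p.2))).map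
        (fun p => (p.1.map PySem.Int.toStr, p.2.map PySem.Int.toStr))
      = ((o.map (fun p => (p.1.map PySem.Int.toStr, p.2.map PySem.Int.toStr))).map
          (fun q => (PySem.Int.toStr x :: q.1, PySem.Int.toStr y :: q.2))) := by
  cases o <;> simp

-- core: the first matching candidate of the product search is B's greedy construction
lemma main_lemma (C : List Int) : ∀ (U L : Int),
    (findPair U L (zipCands C)).map (fun p => (p.1.map PySem.Int.toStr, p.2.map PySem.Int.toStr))
      = if cf C ≤ U ∧ U ≤ cf C + ck C ∧ L = cf C + ck C - (U - cf C)
        then some (buildRows C (ck C - (U - cf C))) else none := by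
  induction C with
  | nil =>
    intro U L
    simp only [zipCands, findPair, cf, ck, buildRows, List.sum_nil]
    by_cases hUL : (0 : Int) = U ∧ (0 : Int) = L
    · rw [if_pos hUL, if_pos (by omega)]; simp
    · rw [if_neg hUL, if_neg (by omega)]; rfl
  | cons ci rest ih =>
    intro U L
    have hk := ck_nonneg rest
    by_cases h2 : ci = 2
    · rw [show zipCands (ci :: rest) = (zipCands rest).map (fun p => (1 :: p.1, 1 :: p.2)) from by
        rw [zipCands, if_pos h2]]
      rw [show cf (ci :: rest) = 1 + cf rest from by rw [cf, if_pos h2]]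
      rw [show ck (ci :: rest) = ck rest from by rw [ck, if_neg (by simp [h2])]; ring]
      rw [findPair_map_cons, map_toStr_cons, ih (U - 1) (L - 1), toStr_one]
      by_cases hc : cf rest ≤ U - 1 ∧ U - 1 ≤ cf rest + ck rest ∧
          L - 1 = cf rest + ck rest - (U - 1 - cf rest)
      · rw [if_pos hc, if_pos (by omega)]
        rw [show buildRows (ci :: rest) (ck rest - (U - (1 + cf rest)))
              = ("1" :: (buildRows rest (ck rest - (U - (1 + cf rest)))).1,
                 "1" :: (buildRows rest (ck rest - (U - (1 + cf rest)))).2) from by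
          rw [buildRows, if_pos h2]]
        have hz : ck rest - (U - (1 + cf rest)) = ck rest - (U - 1 - cf rest) := by omega
        rw [hz]
        rfl
      · rw [if_neg hc, if_neg (by omega)]; rfl
    · by_cases h0 : ci = 0
      · rw [show zipCands (ci :: rest) = (zipCands rest).map (fun p => (0 :: p.1, 0 :: p.2)) from by
          rw [zipCands, if_neg h2, if_pos h0]]
        rw [show cf (ci :: rest) = cf rest from by rw [cf, if_neg h2]; ring]
        rw [show ck (ci :: rest) = ck rest from by rw [ck, if_neg (by simp [h0])]; ring]
        rw [findPair_map_cons, map_toStr_cons, ih (U - 0) (L - 0), toStr_zero]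
        by_cases hc : cf rest ≤ U - 0 ∧ U - 0 ≤ cf rest + ck rest ∧
            L - 0 = cf rest + ck rest - (U - 0 - cf rest)
        · rw [if_pos hc, if_pos (by omega)]
          rw [show buildRows (ci :: rest) (ck rest - (U - cf rest))
                = ("0" :: (buildRows rest (ck rest - (U - cf rest))).1,
                   "0" :: (buildRows rest (ck rest - (U - cf rest))).2) from by
            rw [buildRows, if_neg h2, if_pos h0]]
          have hz : ck rest - (U - cf rest) = ck rest - (U - 0 - cf rest) := by omega
          rw [hz]
          rfl
        · rw [if_neg hc, if_neg (by omega)]; rfl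
      · -- free column
        rw [show zipCands (ci :: rest) = (zipCands rest).map (fun p => (0 :: p.1, 1 :: p.2))
              ++ (zipCands rest).map (fun p => (1 :: p.1, 0 :: p.2)) from by
          rw [zipCands, if_neg h2, if_neg h0]]
        rw [show cf (ci :: rest) = cf rest from by rw [cf, if_neg h2]; ring]
        rw [show ck (ci :: rest) = 1 + ck rest from by rw [ck, if_pos ⟨h2, h0⟩]]
        rw [findPair_append, findPair_map_cons, findPair_map_cons]
        by_cases hc1 : cf rest ≤ U - 0 ∧ U - 0 ≤ cf rest + ck rest ∧
            L - 1 = cf rest + ck rest - (U - 0 - cf rest)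
        · have h01 := ih (U - 0) (L - 1)
          rw [if_pos hc1] at h01
          obtain ⟨p, hp, hps⟩ := Option.map_eq_some_iff.mp h01
          rw [hp]
          simp only [Option.map_some, Option.some_or]
          rw [if_pos (by omega)]
          rw [show buildRows (ci :: rest) (1 + ck rest - (U - cf rest))
                = ("0" :: (buildRows rest (1 + ck rest - (U - cf rest) - 1)).1,
                   "1" :: (buildRows rest (1 + ck rest - (U - cf rest) - 1)).2) from by
            rw [buildRows, if_neg h2, if_neg h0, if_pos (by omega)]]
          have hz : 1 + ck rest - (U - cf rest) - 1 = ck rest - (U - 0 - cf rest) := by omega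
          rw [hz, ← hps]
          simp [List.map_cons, toStr_zero, toStr_one]
        · have h01 := ih (U - 0) (L - 1)
          rw [if_neg hc1] at h01
          rw [Option.map_eq_none_iff.mp h01]
          simp only [Option.map_none, Option.none_or]
          have h10 := ih (U - 1) (L - 0)
          by_cases hc2 : cf rest ≤ U - 1 ∧ U - 1 ≤ cf rest + ck rest ∧
              L - 0 = cf rest + ck rest - (U - 1 - cf rest)
          · rw [if_pos hc2] at h10
            obtain ⟨p, hp, hps⟩ := Option.map_eq_some_iff.mp h10
            rw [hp]
            simp only [Option.map_some]
            rw [if_pos (by omega)]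
            rw [show buildRows (ci :: rest) (1 + ck rest - (U - cf rest))
                  = ("1" :: (buildRows rest (1 + ck rest - (U - cf rest))).1,
                     "0" :: (buildRows rest (1 + ck rest - (U - cf rest))).2) from by
              rw [buildRows, if_neg h2, if_neg h0, if_neg (by omega)]]
            have hz : 1 + ck rest - (U - cf rest) = ck rest - (U - 1 - cf rest) := by omega
            rw [hz, ← hps]
            simp [List.map_cons, toStr_zero, toStr_one]
          · rw [if_neg hc2] at h10
            rw [Option.map_eq_none_iff.mp h10, if_neg (by omega)]
            rfl

lemma foldl_counts (C : List Int) : ∀ (a b : Int),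
    C.foldl (fun (p : Int × Int) ci =>
      if ci = 2 then (p.1 + 1, p.2) else if ci ≠ 0 then (p.1, p.2 + 1) else p) (a, b)
      = (a + cf C, b + ck C) := by
  induction C with
  | nil => intro a b; simp [cf, ck]
  | cons ci rest ih =>
    intro a b
    rw [List.foldl_cons]
    by_cases h2 : ci = 2
    · rw [if_pos h2, ih, cf, ck, if_pos h2, if_neg (by simp [h2]), Prod.mk.injEq]
      constructor <;> ring
    · by_cases h0 : ci = 0
      · rw [if_neg h2, if_neg (by simp [h0]), ih, cf, ck, if_neg h2,
          if_neg (by simp [h0]), Prod.mk.injEq]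
        constructor <;> ring
      · rw [if_neg h2, if_pos h0, ih, cf, ck, if_neg h2, if_pos ⟨h2, h0⟩, Prod.mk.injEq]
        constructor <;> ring

theorem solution_eq (U L : Int) (C : List Int) : solution U L C = solution_alt U L C := by
  unfold solution solution_alt
  rw [pyProduct_fst, pyProduct_snd]
  rw [searchLoop_eq_findPair U L (zipCands C) (zipCands C) 0 (by simp)]
  rw [foldl_counts C 0 0]
  simp only [zero_add]
  have hm := main_lemma C U L
  by_cases hc : cf C ≤ U ∧ U ≤ cf C + ck C ∧ L = cf C + ck C - (U - cf C)
  · rw [if_pos hc] at hm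
    obtain ⟨p, hp, hps⟩ := Option.map_eq_some_iff.mp hm
    rw [hp]
    rw [if_neg (show ¬ (U - cf C < 0 ∨ U - cf C > ck C ∨ L ≠ cf C + ck C - (U - cf C)) by
      omega)]
    have h1 : (buildRows C (ck C - (U - cf C))).1 = p.1.map PySem.Int.toStr := by rw [← hps]
    have h2 : (buildRows C (ck C - (U - cf C))).2 = p.2.map PySem.Int.toStr := by rw [← hps]
    simp only [h1, h2]
    rfl
  · rw [if_neg hc] at hm
    rw [Option.map_eq_none_iff.mp hm]
    rw [if_pos (by omega)]

-- ===== VERDICT (by name: the statement is the Claim_ definition above) =====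
theorem solution_spec : Claim_equal_solution := by
  intro U L C _
  unfold Spec_solution
  exact solution_eq U L C
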